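-- pv_equiv track=rewrite | github.com/velezy/yamil-browser | chat-service/assemblyline-common/assemblyline_common/ai/multi_agent.py | find_best_agent
-- ===== SOURCE A (Python) =====
-- from typing import Optional, Dict, List, Any, Callable, Awaitable
-- from enum import Enum
--
-- class AgentRole(str, Enum):
--     """Agent roles in multi-agent system."""
--     ORCHESTRATOR = "orchestrator"
--     FLOW_BUILDER = "flow-builder"
--     ADMIN = "admin"
--     ANALYSIS = "analysis"
--     QUERY = "query"
--     SPECIALIST = "specialist"
--
-- AGENT_CAPABILITIES = {
--     AgentRole.FLOW_BUILDER: {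
--         "description": "Creates and modifies integration flows",
--         "can_handle": [
--             "create_flow", "update_flow", "validate_flow", "deploy_flow",
--             "flow_design", "node_configuration", "edge_routing",
--         ],
--         "tools": [
--             "create_flow", "get_flow", "update_flow", "validate_flow",
--             "list_connectors", "deploy_flow",
--         ],
--     },
--     AgentRole.ADMIN: {
--         "description": "Manages API keys, users, and system configuration",
--         "can_handle": [
--             "api_key_management", "user_management", "connector_configuration",
--             "permissions", "security", "access_control",
--         ],
--         "tools": [
--             "create_api_key", "list_api_keys", "revoke_api_key",
--             "invite_user", "list_users", "update_user_role",
--             "create_connector", "test_connector",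
--         ],
--     },
--     AgentRole.ANALYSIS: {
--         "description": "Parses and analyzes HL7/FHIR messages",
--         "can_handle": [
--             "hl7_parsing", "fhir_parsing", "message_validation",
--             "performance_analysis", "error_diagnostics", "data_comparison",
--         ],
--         "tools": [
--             "parse_hl7", "validate_hl7", "parse_fhir", "validate_fhir",
--             "analyze_flow_performance", "get_error_summary", "compare_messages",
--         ],
--     },
--     AgentRole.QUERY: {
--         "description": "Searches and queries data, monitors CDC pipelines",
--         "can_handle": [
--             "message_search", "audit_log_query", "statistics",
--             "trend_analysis", "compliance_reports",
--             "cdc_monitoring", "cdc_statistics", "delivery_tracking",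
--             "schema_drift_detection", "cdc_health_check",
--         ],
--         "tools": [
--             "search_messages", "get_message_details", "get_audit_logs",
--             "get_phi_access_logs", "get_statistics", "get_trend_analysis",
--             "list_cdc_monitors", "get_cdc_stats", "get_cdc_health",
--             "list_cdc_deliveries", "list_cdc_schema_drifts",
--         ],
--     },
-- }
--
-- def find_best_agent(task_type: str) -> Optional[AgentRole]:
--     """Find the best agent for a given task type."""
--     for role, capabilities in AGENT_CAPABILITIES.items():
--         if task_type in capabilities["can_handle"]:
--             return role
--
--     # Check if any tool matches
--     for role, capabilities in AGENT_CAPABILITIES.items():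
--         if task_type in capabilities["tools"]:
--             return role
--
--     return None
-- ===== SOURCE B (Python) =====
-- from typing import Optional
-- from enum import Enum
--
-- class AgentRole(str, Enum):
--     """Agent roles in multi-agent system."""
--     ORCHESTRATOR = "orchestrator"
--     FLOW_BUILDER = "flow-builder"
--     ADMIN = "admin"
--     ANALYSIS = "analysis"
--     QUERY = "query"
--     SPECIALIST = "specialist"
--
-- # Flat precomputed lookup table task_type -> role.  No task type occurs under
-- # two roles, and within a role can_handle and tools map to the same role, so a
-- # single table is exactly equivalent to A's two priority scans.
-- TASK_TO_ROLE = {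
--     "create_flow": AgentRole("flow-builder"),
--     "update_flow": AgentRole("flow-builder"),
--     "validate_flow": AgentRole("flow-builder"),
--     "deploy_flow": AgentRole("flow-builder"),
--     "flow_design": AgentRole("flow-builder"),
--     "node_configuration": AgentRole("flow-builder"),
--     "edge_routing": AgentRole("flow-builder"),
--     "get_flow": AgentRole("flow-builder"),
--     "list_connectors": AgentRole("flow-builder"),
--     "api_key_management": AgentRole("admin"),
--     "user_management": AgentRole("admin"),
--     "connector_configuration": AgentRole("admin"),
--     "permissions": AgentRole("admin"),
--     "security": AgentRole("admin"),
--     "access_control": AgentRole("admin"),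
--     "create_api_key": AgentRole("admin"),
--     "list_api_keys": AgentRole("admin"),
--     "revoke_api_key": AgentRole("admin"),
--     "invite_user": AgentRole("admin"),
--     "list_users": AgentRole("admin"),
--     "update_user_role": AgentRole("admin"),
--     "create_connector": AgentRole("admin"),
--     "test_connector": AgentRole("admin"),
--     "hl7_parsing": AgentRole("analysis"),
--     "fhir_parsing": AgentRole("analysis"),
--     "message_validation": AgentRole("analysis"),
--     "performance_analysis": AgentRole("analysis"),
--     "error_diagnostics": AgentRole("analysis"),
--     "data_comparison": AgentRole("analysis"),
--     "parse_hl7": AgentRole("analysis"),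
--     "validate_hl7": AgentRole("analysis"),
--     "parse_fhir": AgentRole("analysis"),
--     "validate_fhir": AgentRole("analysis"),
--     "analyze_flow_performance": AgentRole("analysis"),
--     "get_error_summary": AgentRole("analysis"),
--     "compare_messages": AgentRole("analysis"),
--     "message_search": AgentRole("query"),
--     "audit_log_query": AgentRole("query"),
--     "statistics": AgentRole("query"),
--     "trend_analysis": AgentRole("query"),
--     "compliance_reports": AgentRole("query"),
--     "cdc_monitoring": AgentRole("query"),
--     "cdc_statistics": AgentRole("query"),
--     "delivery_tracking": AgentRole("query"),
--     "schema_drift_detection": AgentRole("query"),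
--     "cdc_health_check": AgentRole("query"),
--     "search_messages": AgentRole("query"),
--     "get_message_details": AgentRole("query"),
--     "get_audit_logs": AgentRole("query"),
--     "get_phi_access_logs": AgentRole("query"),
--     "get_statistics": AgentRole("query"),
--     "get_trend_analysis": AgentRole("query"),
--     "list_cdc_monitors": AgentRole("query"),
--     "get_cdc_stats": AgentRole("query"),
--     "get_cdc_health": AgentRole("query"),
--     "list_cdc_deliveries": AgentRole("query"),
--     "list_cdc_schema_drifts": AgentRole("query"),
-- }
--
-- def find_best_agent(task_type: str) -> Optional[AgentRole]:
--     """Find the best agent for a given task type."""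
--     return TASK_TO_ROLE.get(task_type)
-- ===== Notes on version B (the rewrite author's own statement) =====
-- stated objective: idiomatic
-- what changed: A's two priority scans over AGENT_CAPABILITIES (membership test per role per call) are replaced by one flat precomputed literal table TASK_TO_ROLE and a single dict .get; this is exact because no task type occurs under two roles, so the can_handle/tools priority never decides anything.
import Mathlib
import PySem

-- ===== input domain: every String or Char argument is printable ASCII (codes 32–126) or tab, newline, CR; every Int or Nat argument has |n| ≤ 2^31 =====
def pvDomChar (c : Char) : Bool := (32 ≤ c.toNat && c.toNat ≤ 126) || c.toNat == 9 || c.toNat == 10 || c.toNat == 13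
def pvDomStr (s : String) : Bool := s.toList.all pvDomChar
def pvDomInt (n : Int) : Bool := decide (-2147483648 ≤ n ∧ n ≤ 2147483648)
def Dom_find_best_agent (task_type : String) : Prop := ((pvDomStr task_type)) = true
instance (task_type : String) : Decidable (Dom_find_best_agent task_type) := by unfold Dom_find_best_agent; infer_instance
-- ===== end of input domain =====

-- ===== PORT A =====
-- A: scan AGENT_CAPABILITIES for the first role whose can_handle contains
-- task_type; then a second scan over each role's tools; else None.
-- AGENT_CAPABILITIES as (role, can_handle, tools), in insertion order (description unused).
def pvCaps : List (String × List String × List String) :=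
  [ ("flow-builder",
      ["create_flow", "update_flow", "validate_flow", "deploy_flow",
       "flow_design", "node_configuration", "edge_routing"],
      ["create_flow", "get_flow", "update_flow", "validate_flow",
       "list_connectors", "deploy_flow"]),
    ("admin",
      ["api_key_management", "user_management", "connector_configuration",
       "permissions", "security", "access_control"],
      ["create_api_key", "list_api_keys", "revoke_api_key",
       "invite_user", "list_users", "update_user_role",
       "create_connector", "test_connector"]),
    ("analysis",
      ["hl7_parsing", "fhir_parsing", "message_validation",
       "performance_analysis", "error_diagnostics", "data_comparison"],
      ["parse_hl7", "validate_hl7", "parse_fhir", "validate_fhir",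
       "analyze_flow_performance", "get_error_summary", "compare_messages"]),
    ("query",
      ["message_search", "audit_log_query", "statistics",
       "trend_analysis", "compliance_reports",
       "cdc_monitoring", "cdc_statistics", "delivery_tracking",
       "schema_drift_detection", "cdc_health_check"],
      ["search_messages", "get_message_details", "get_audit_logs",
       "get_phi_access_logs", "get_statistics", "get_trend_analysis",
       "list_cdc_monitors", "get_cdc_stats", "get_cdc_health",
       "list_cdc_deliveries", "list_cdc_schema_drifts"]) ]

def find_best_agent (task_type : String) : Option String :=
  match pvCaps.find? (fun rc => rc.2.1.contains task_type) with
  | some rc => some rc.1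
  | none =>
    match pvCaps.find? (fun rc => rc.2.2.contains task_type) with
    | some rc => some rc.1
    | none => none

-- ===== PORT B =====
-- B: one flat precomputed literal table task_type -> role (Source B's TASK_TO_ROLE
-- dict literal, keys in the same order), and the body is a single lookup.
def pvTaskToRole : PySem.Dict String String := PySem.Dict.mk
  [("create_flow", "flow-builder"),
    ("update_flow", "flow-builder"),
    ("validate_flow", "flow-builder"),
    ("deploy_flow", "flow-builder"),
    ("flow_design", "flow-builder"),
    ("node_configuration", "flow-builder"),
    ("edge_routing", "flow-builder"),
    ("get_flow", "flow-builder"),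
    ("list_connectors", "flow-builder"),
    ("api_key_management", "admin"),
    ("user_management", "admin"),
    ("connector_configuration", "admin"),
    ("permissions", "admin"),
    ("security", "admin"),
    ("access_control", "admin"),
    ("create_api_key", "admin"),
    ("list_api_keys", "admin"),
    ("revoke_api_key", "admin"),
    ("invite_user", "admin"),
    ("list_users", "admin"),
    ("update_user_role", "admin"),
    ("create_connector", "admin"),
    ("test_connector", "admin"),
    ("hl7_parsing", "analysis"),
    ("fhir_parsing", "analysis"),
    ("message_validation", "analysis"),
    ("performance_analysis", "analysis"),
    ("error_diagnostics", "analysis"),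
    ("data_comparison", "analysis"),
    ("parse_hl7", "analysis"),
    ("validate_hl7", "analysis"),
    ("parse_fhir", "analysis"),
    ("validate_fhir", "analysis"),
    ("analyze_flow_performance", "analysis"),
    ("get_error_summary", "analysis"),
    ("compare_messages", "analysis"),
    ("message_search", "query"),
    ("audit_log_query", "query"),
    ("statistics", "query"),
    ("trend_analysis", "query"),
    ("compliance_reports", "query"),
    ("cdc_monitoring", "query"),
    ("cdc_statistics", "query"),
    ("delivery_tracking", "query"),
    ("schema_drift_detection", "query"),
    ("cdc_health_check", "query"),
    ("search_messages", "query"),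
    ("get_message_details", "query"),
    ("get_audit_logs", "query"),
    ("get_phi_access_logs", "query"),
    ("get_statistics", "query"),
    ("get_trend_analysis", "query"),
    ("list_cdc_monitors", "query"),
    ("get_cdc_stats", "query"),
    ("get_cdc_health", "query"),
    ("list_cdc_deliveries", "query"),
    ("list_cdc_schema_drifts", "query")]

def find_best_agent_alt (task_type : String) : Option String :=
  pvTaskToRole.get? task_type

-- ===== PRECONDITION & SPEC =====
def Spec_find_best_agent (task_type : String) (out : Option String) : Prop := out = find_best_agent_alt task_type
instance (task_type : String) (out : Option String) : Decidable (Spec_find_best_agent task_type out) := by unfold Spec_find_best_agent; infer_instance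

-- ===== CLAIM (what is proved, stated in full; the proofs are below) =====
def Claim_equal_find_best_agent : Prop := ∀ (task_type : String), Dom_find_best_agent task_type → Spec_find_best_agent task_type (find_best_agent task_type)

-- ===== LEMMAS AND PROOFS =====

-- every task_type string occurring anywhere in either table
def pvAllKeys : List String :=
  ["create_flow",
    "update_flow",
    "validate_flow",
    "deploy_flow",
    "flow_design",
    "node_configuration",
    "edge_routing",
    "get_flow",
    "list_connectors",
    "api_key_management",
    "user_management",
    "connector_configuration",
    "permissions",
    "security",
    "access_control",
    "create_api_key",
    "list_api_keys",
    "revoke_api_key",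
    "invite_user",
    "list_users",
    "update_user_role",
    "create_connector",
    "test_connector",
    "hl7_parsing",
    "fhir_parsing",
    "message_validation",
    "performance_analysis",
    "error_diagnostics",
    "data_comparison",
    "parse_hl7",
    "validate_hl7",
    "parse_fhir",
    "validate_fhir",
    "analyze_flow_performance",
    "get_error_summary",
    "compare_messages",
    "message_search",
    "audit_log_query",
    "statistics",
    "trend_analysis",
    "compliance_reports",
    "cdc_monitoring",
    "cdc_statistics",
    "delivery_tracking",
    "schema_drift_detection",
    "cdc_health_check",
    "search_messages",
    "get_message_details",
    "get_audit_logs",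
    "get_phi_access_logs",
    "get_statistics",
    "get_trend_analysis",
    "list_cdc_monitors",
    "get_cdc_stats",
    "get_cdc_health",
    "list_cdc_deliveries",
    "list_cdc_schema_drifts"]

theorem get?_mk_none_of_not_mem (l : List (String × String)) (t : String)
    (h : ∀ p ∈ l, ¬ p.1 = t) : (PySem.Dict.mk l).get? t = none := by
  induction l with
  | nil => simp [PySem.Dict.get?]
  | cons p l ih =>
    rw [PySem.Dict.get?_mk_cons]
    have hp : ¬ p.1 = t := h p (List.mem_cons_self ..)
    simp only [beq_iff_eq, if_neg hp]
    exact ih (fun q hq => h q (List.mem_cons_of_mem _ hq))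

-- ===== VERDICT (by name: the statement is the Claim_ definition above) =====
theorem find_best_agent_spec : Claim_equal_find_best_agent := by
  intro t _
  unfold Spec_find_best_agent
  by_cases h : t ∈ pvAllKeys
  · fin_cases h <;> rfl
  · unfold find_best_agent find_best_agent_alt pvTaskToRole
    rw [List.find?_eq_none.mpr ?_, List.find?_eq_none.mpr ?_,
        get?_mk_none_of_not_mem _ _ ?_]
    · intro p hp hpt
      exact h (by fin_cases hp <;> subst hpt <;> decide)
    · intro rc hrc
      simp only [Bool.not_eq_true, List.contains_eq_mem, decide_eq_false_iff_not]
      intro hm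
      exact h (by fin_cases hrc <;> fin_cases hm <;> decide)
    · intro rc hrc
      simp only [Bool.not_eq_true, List.contains_eq_mem, decide_eq_false_iff_not]
      intro hm
      exact h (by fin_cases hrc <;> fin_cases hm <;> decide)
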